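-- pv_equiv track=rewrite | github.com/mfascia/Kryptos | kryptos.py | genAlphabet
-- ===== SOURCE A (Python) =====
-- ALPHABET = "ABCDEFGHIJKLMNOPQRSTUVWXYZ"
--
-- def genAlphabet(key: str) -> str:
--     processed = ""
--     alpha = ""
--     for c in key:
--         if c not in alpha:
--             alpha += c
--     for c in ALPHABET:
--         if c not in alpha:
--             alpha += c
--     return alpha
-- ===== SOURCE B (Python) =====
-- ALPHABET = "ABCDEFGHIJKLMNOPQRSTUVWXYZ"
--
-- def genAlphabet(key: str) -> str:
--     # Shrinking-sequence dedup: emit the head of the remaining sequence,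
--     # then delete every occurrence of it; no seen-set is ever consulted.
--     s = key + ALPHABET
--     out = []
--     while s:
--         c = s[0]
--         out.append(c)
--         s = s.replace(c, "")
--     return "".join(out)
-- ===== Notes on version B (the rewrite author's own statement) =====
-- stated objective: alternative
-- what changed: A grows a seen-set and membership-guards two phased loops; B instead walks one concatenated sequence that it SHRINKS: emit the current head, delete all of its occurrences from the rest, repeat until empty - no seen-set or membership test against an accumulator at all.
import Mathlib
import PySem

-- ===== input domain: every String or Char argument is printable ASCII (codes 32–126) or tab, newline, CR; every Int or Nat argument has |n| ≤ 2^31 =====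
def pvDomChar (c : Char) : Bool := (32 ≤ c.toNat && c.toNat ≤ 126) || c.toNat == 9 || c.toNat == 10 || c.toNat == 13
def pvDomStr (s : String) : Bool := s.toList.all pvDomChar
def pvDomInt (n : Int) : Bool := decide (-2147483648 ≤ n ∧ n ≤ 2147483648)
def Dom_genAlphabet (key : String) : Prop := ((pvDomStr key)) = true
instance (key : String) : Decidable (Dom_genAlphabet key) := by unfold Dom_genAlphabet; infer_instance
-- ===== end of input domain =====

-- B replaces A's two seen-set-guarded loops with a shrinking-sequence dedup of key ++ ALPHABET
-- (emit head, delete all its occurrences, repeat); alternative decomposition, return value only.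

-- ===== PORT A =====
def pvALPHABET : String := "ABCDEFGHIJKLMNOPQRSTUVWXYZ"

-- 'if c not in alpha: alpha += c', run over key then over ALPHABET (strings as List Char)
def genAlphabetStep (alpha : List Char) (c : Char) : List Char :=
  if c ∈ alpha then alpha else alpha ++ [c]

def genAlphabet (key : String) : String :=
  String.mk ((pvALPHABET.toList).foldl genAlphabetStep
    ((key.toList).foldl genAlphabetStep []))

-- ===== PORT B =====
-- the while loop: s nonempty → emit s[0]; s.replace(c, "") on s = c :: t is exactly t with
-- every occurrence of c filtered out (replace-all of a single char by "" = filter),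
-- ported step for step as recursion on the shrinking list
def remDedup : List Char → List Char
  | [] => []
  | c :: t => c :: remDedup (t.filter (fun x => x ≠ c))
termination_by s => s.length
decreasing_by
  simp only [List.length_cons, Nat.lt_succ_iff, List.length_unattach]
  exact (List.length_filter_le _ _).trans (le_of_eq List.length_attach)

def genAlphabet_alt (key : String) : String :=
  String.mk (remDedup (key.toList ++ "ABCDEFGHIJKLMNOPQRSTUVWXYZ".toList))

-- ===== PRECONDITION & SPEC =====
def Spec_genAlphabet (key : String) (out : String) : Prop := out = genAlphabet_alt key
instance (key : String) (out : String) : Decidable (Spec_genAlphabet key out) := by unfold Spec_genAlphabet; infer_instance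

-- ===== CLAIM (what is proved, stated in full; the proofs are below) =====
def Claim_equal_genAlphabet : Prop := ∀ (key : String), Dom_genAlphabet key → Spec_genAlphabet key (genAlphabet key)

-- ===== LEMMAS AND PROOFS =====

theorem remDedup_nil : remDedup [] = [] := by rw [remDedup.eq_def]

theorem remDedup_cons (c : Char) (t : List Char) :
    remDedup (c :: t) = c :: remDedup (t.filter (fun x => x ≠ c)) := by rw [remDedup.eq_def]

-- A's fold with accumulator acc equals acc followed by the shrinking dedup of xs with
-- the elements of acc filtered out (strong induction on the length of xs)
theorem foldl_step_eq_remDedup : ∀ (n : Nat) (xs : List Char), xs.length ≤ n →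
    ∀ acc : List Char,
      xs.foldl genAlphabetStep acc = acc ++ remDedup (xs.filter (fun x => x ∉ acc)) := by
  intro n
  induction n with
  | zero =>
    intro xs hlen acc
    have : xs = [] := List.eq_nil_of_length_eq_zero (Nat.le_zero.mp hlen)
    subst this; simp [remDedup_nil]
  | succ n ih =>
    intro xs hlen acc
    cases xs with
    | nil => simp [remDedup_nil]
    | cons c t =>
      have ht : t.length ≤ n := Nat.le_of_succ_le_succ hlen
      by_cases hc : c ∈ acc
      · have hfil : (c :: t).filter (fun x => x ∉ acc) = t.filter (fun x => x ∉ acc) := by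
          simp [hc]
        have hstep : genAlphabetStep acc c = acc := by simp [genAlphabetStep, hc]
        rw [hfil, List.foldl_cons, hstep]
        exact ih t ht acc
      · have hstep : genAlphabetStep acc c = acc ++ [c] := by simp [genAlphabetStep, hc]
        have hfil : (c :: t).filter (fun x => x ∉ acc) = c :: t.filter (fun x => x ∉ acc) := by
          simp [hc]
        have hcomb : (t.filter (fun x => x ∉ acc)).filter (fun x => x ≠ c)
            = t.filter (fun x => x ∉ acc ++ [c]) := by
          rw [List.filter_filter]
          apply List.filter_congr
          intro x _
          simp [List.mem_append]
          rw [Bool.and_comm]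
        rw [List.foldl_cons, hstep, ih t ht (acc ++ [c]), hfil, remDedup_cons, hcomb]
        simp [List.append_assoc]

-- ===== VERDICT (by name: the statement is the Claim_ definition above) =====
theorem genAlphabet_spec : Claim_equal_genAlphabet := by
  intro key _
  show _ = _
  simp only [genAlphabet, genAlphabet_alt, pvALPHABET, ← List.foldl_append]
  have h := foldl_step_eq_remDedup (key.toList ++ "ABCDEFGHIJKLMNOPQRSTUVWXYZ".toList).length
    (key.toList ++ "ABCDEFGHIJKLMNOPQRSTUVWXYZ".toList) (Nat.le_refl _) []
  have hf : (key.toList ++ "ABCDEFGHIJKLMNOPQRSTUVWXYZ".toList).filter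
      (fun x => x ∉ ([] : List Char)) = key.toList ++ "ABCDEFGHIJKLMNOPQRSTUVWXYZ".toList := by
    apply List.filter_eq_self.mpr
    intro a _
    simp
  rw [hf, List.nil_append] at h
  rw [h]
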